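-- pv_equiv track=rewrite | github.com/prannb/Sentence-reordering | matrix2num.py | m2n
-- ===== SOURCE A (Python) =====
-- input_lists = [['dear', 'local', 'newspaper', 'think', 'effects', 'computers', 'people', 'great', 'learning', 'skillsaffects', 'give', 'us', 'time', 'chat', 'friendsnew', 'people', 'helps', 'us', 'learn', 'globe', 'astronomy', 'keeps', 'us', 'troble'], ['thing'], ['dont', 'think'], ['would', 'feel', 'teenager', 'always', 'phone', 'friends'], ['ever', 'time', 'chat', 'friends', 'buisness', 'partner', 'things'], ['well', 'new', 'way', 'chat', 'computer', 'plenty', 'sites', 'internet', 'facebook', 'myspace', 'ect'], ['think', 'setting', 'meeting', 'boss', 'computer', 'teenager', 'fun', 'phone', 'rushing', 'get', 'cause', 'want', 'use'], ['learn', 'countrysstates', 'outside'], ['well', 'computerinternet', 'new', 'way', 'learn', 'going', 'time'], ['might', 'think', 'child', 'spends', 'lot', 'time', 'computer', 'ask', 'question', 'economy', 'sea', 'floor', 'spreading', 'even', 'surprise', 'much', 'heshe', 'knows'], ['believe', 'computer', 'much', 'interesting', 'class', 'day', 'reading', 'books'], ['child', 'home', 'computer', 'local', 'library', 'better', 'friends',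 'fresh', 'perpressured', 'something', 'know', 'isnt', 'right'], ['might', 'know', 'child', 'forbidde', 'hospital', 'bed', 'driveby'], ['rather', 'child', 'computer', 'learning', 'chatting', 'playing', 'games', 'safe', 'sound', 'home', 'community', 'place'], ['hope', 'reached', 'point', 'understand', 'agree', 'computers', 'great', 'effects', 'child', 'gives', 'us', 'time', 'chat', 'friendsnew', 'people', 'helps', 'us', 'learn', 'globe', 'believe', 'keeps', 'us', 'troble'], ['thank', 'listening']]
--
-- def m2n(input_lists = input_lists):
--   output_lists = []
--   num2word = {}
--   word2num = {}
--
--   count = 0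
--
--   for list in input_lists:
--     output_lists.append([])
--     for word in list:
--       if word not in word2num:
--         word2num[word] = count
--         num2word[count] = word
--         count += 1
--       output_lists[-1].append(word2num[word])
--
--   return output_lists, num2word, word2num
-- ===== SOURCE B (Python) =====
-- input_lists = [['dear', 'local', 'newspaper', 'think', 'effects', 'computers', 'people', 'great', 'learning', 'skillsaffects', 'give', 'us', 'time', 'chat', 'friendsnew', 'people', 'helps', 'us', 'learn', 'globe', 'astronomy', 'keeps', 'us', 'troble'], ['thing'], ['dont', 'think'], ['would', 'feel', 'teenager', 'always', 'phone', 'friends'], ['ever', 'time', 'chat', 'friends', 'buisness', 'partner', 'things'], ['well', 'new', 'way', 'chat', 'computer', 'plenty', 'sites', 'internet', 'facebook', 'myspace', 'ect'], ['think', 'setting', 'meeting', 'boss', 'computer', 'teenager', 'fun', 'phone', 'rushing', 'get', 'cause', 'want', 'use'], ['learn', 'countrysstates', 'outside'], ['well', 'computerinternet', 'new', 'way', 'learn', 'going', 'time'], ['might', 'think', 'child', 'spends', 'lot', 'time', 'computer', 'ask', 'question', 'economy', 'sea', 'floor', 'spreading', 'even', 'surprise', 'much', 'heshe', 'knows'],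 ['believe', 'computer', 'much', 'interesting', 'class', 'day', 'reading', 'books'], ['child', 'home', 'computer', 'local', 'library', 'better', 'friends', 'fresh', 'perpressured', 'something', 'know', 'isnt', 'right'], ['might', 'know', 'child', 'forbidde', 'hospital', 'bed', 'driveby'], ['rather', 'child', 'computer', 'learning', 'chatting', 'playing', 'games', 'safe', 'sound', 'home', 'community', 'place'], ['hope', 'reached', 'point', 'understand', 'agree', 'computers', 'great', 'effects', 'child', 'gives', 'us', 'time', 'chat', 'friendsnew', 'people', 'helps', 'us', 'learn', 'globe', 'believe', 'keeps', 'us', 'troble'], ['thank', 'listening']]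
--
-- def m2n(input_lists=input_lists):
--   # Two separate passes: build the vocabulary first, then apply it.
--   vocab = list(dict.fromkeys(word for lst in input_lists for word in lst))
--   word2num = {word: i for i, word in enumerate(vocab)}
--   num2word = {i: word for i, word in enumerate(vocab)}
--   output_lists = [[word2num[word] for word in lst] for lst in input_lists]
--   return output_lists, num2word, word2num
-- ===== Notes on version B (the rewrite author's own statement) =====
-- stated objective: simpler
-- what changed: A interleaves vocabulary construction and encoding in one nested loop with an 'if word not in word2num' branch; B decomposes the task into two separate passes: first build the vocabulary via dict.fromkeys over the flattened word stream and enumerate it into the two index tables, then map every word through the finished table with a nested comprehension.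
import Mathlib
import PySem

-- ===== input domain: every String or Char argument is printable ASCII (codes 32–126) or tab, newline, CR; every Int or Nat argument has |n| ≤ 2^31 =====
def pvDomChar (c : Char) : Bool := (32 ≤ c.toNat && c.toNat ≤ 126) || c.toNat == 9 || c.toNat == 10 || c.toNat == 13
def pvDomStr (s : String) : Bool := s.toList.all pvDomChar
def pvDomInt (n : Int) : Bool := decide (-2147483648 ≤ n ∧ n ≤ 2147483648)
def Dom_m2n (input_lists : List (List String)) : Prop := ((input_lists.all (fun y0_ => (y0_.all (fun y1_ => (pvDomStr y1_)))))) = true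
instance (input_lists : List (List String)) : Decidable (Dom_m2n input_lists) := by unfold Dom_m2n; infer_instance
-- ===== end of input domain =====

-- B replaces A's single interleaved nested loop by two separate passes: build the vocabulary
-- (dict.fromkeys of the flattened stream), then map every word through the finished table.

-- ===== PORT A =====
-- 'output_lists.append([]); output_lists[-1].append(x)' is modelled by carrying the current row
-- and appending the finished row, so output_lists has the same value at every iteration boundary.
-- 'word2num[word]' (always present here) is ported as getD with default 0.
def m2n (input_lists : List (List String)) : List (List Int) × (List (Int × String)) × (List (String × Int)) :=
  let st := input_lists.foldl
    (fun (st : List (List Int) × PySem.Dict Int String × PySem.Dict String Int × Int) lst =>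
      let inner := lst.foldl
        (fun (s : List Int × PySem.Dict Int String × PySem.Dict String Int × Int) word =>
          let (row, num2word, word2num, count) := s
          let (num2word, word2num, count) :=
            if word2num.contains word then (num2word, word2num, count)
            else (num2word.insert count word, word2num.insert word count, count + 1)
          (row ++ [word2num.getD word 0], num2word, word2num, count))
        ([], st.2.1, st.2.2.1, st.2.2.2)
      (st.1 ++ [inner.1], inner.2.1, inner.2.2.1, inner.2.2.2))
    ([], PySem.Dict.empty, PySem.Dict.empty, 0)
  (st.1, st.2.1.items, st.2.2.1.items)

-- ===== PORT B =====
-- dict.fromkeys over the flattened generator = PySem.List.dedup of the flattened list;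
-- the dict comprehensions are Dict.ofList of the enumerated pairs; word2num[word] (always
-- present) is ported as getD with default 0.
def m2n_alt (input_lists : List (List String)) : List (List Int) × (List (Int × String)) × (List (String × Int)) :=
  let vocab := PySem.List.dedup (input_lists.flatMap (fun lst => lst))
  let word2num : PySem.Dict String Int :=
    PySem.Dict.ofList ((PySem.List.enumerate vocab).map (fun p => (p.2, p.1)))
  let num2word : PySem.Dict Int String := PySem.Dict.ofList (PySem.List.enumerate vocab)
  let output_lists := input_lists.map (fun lst => lst.map (fun word => word2num.getD word 0))
  (output_lists, num2word.items, word2num.items)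

-- ===== PRECONDITION & SPEC =====
def Spec_m2n (input_lists : List (List String)) (out : List (List Int) × (List (Int × String)) × (List (String × Int))) : Prop := out = m2n_alt input_lists
instance (input_lists : List (List String)) (out : List (List Int) × (List (Int × String)) × (List (String × Int))) : Decidable (Spec_m2n input_lists out) := by unfold Spec_m2n; infer_instance

-- ===== CLAIM (what is proved, stated in full; the proofs are below) =====
def Claim_equal_m2n : Prop := ∀ (input_lists : List (List String)), Dom_m2n input_lists → Spec_m2n input_lists (m2n input_lists)

-- ===== LEMMAS AND PROOFS =====

-- Proof-side abstractions: the vocabulary after a word stream (first occurrences, in order),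
-- the index of a word in it, and the two dictionaries A maintains, characterised by that vocabulary.
def voc (ws : List String) : List String := PySem.List.dedup ws
def numOf (ws : List String) (w : String) : Int := (((PySem.List.index? (voc ws) w).getD 0 : Nat) : Int)
def w2nOf (ws : List String) : PySem.Dict String Int :=
  PySem.Dict.mk ((PySem.List.enumerate (voc ws)).map (fun p => (p.2, p.1)))
def n2wOf (ws : List String) : PySem.Dict Int String :=
  PySem.Dict.mk (PySem.List.enumerate (voc ws))

lemma mem_voc {w : String} {ws : List String} : w ∈ voc ws ↔ w ∈ ws := by
  simp [voc, PySem.List.dedup_eq_ofList, PySem.Set.mem_ofList]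

lemma voc_snoc (ws : List String) (w : String) :
    voc (ws ++ [w]) = if w ∈ ws then voc ws else voc ws ++ [w] := by
  simp only [voc, PySem.List.dedup_eq_ofList, PySem.Set.ofList_eq_foldl, List.foldl_append,
    List.foldl_cons, List.foldl_nil]
  have hm : w ∈ List.foldl PySem.Set.add [] ws ↔ w ∈ ws := by
    simpa [PySem.Set.ofList_eq_foldl] using PySem.Set.mem_ofList ws w
  by_cases h : w ∈ ws
  · rw [if_pos h]
    simp [PySem.Set.add, PySem.Set.contains, hm.2 h]
  · rw [if_neg h]
    have hn : w ∉ List.foldl PySem.Set.add [] ws := fun hc => h (hm.1 hc)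
    simp [PySem.Set.add, PySem.Set.contains, hn]

lemma voc_append_prefix (ws ys : List String) : voc ws <+: voc (ws ++ ys) := by
  induction ys using List.reverseRecOn with
  | nil => simp
  | append_singleton ys y ih =>
    rw [← List.append_assoc, voc_snoc]
    split
    · exact ih
    · exact ih.trans ⟨[y], rfl⟩

lemma stab {w : String} {ws : List String} (ys : List String) (h : w ∈ ws) :
    numOf (ws ++ ys) w = numOf ws w := by
  obtain ⟨t, ht⟩ := voc_append_prefix ws ys
  unfold numOf
  rw [← ht, PySem.List.index?_append_of_mem t (mem_voc.2 h)]

lemma get?_w2n_aux (V : List String) (s : Int) (w : String) :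
    (PySem.Dict.mk ((PySem.List.enumerate V s).map (fun p => (p.2, p.1)))).get? w
      = (PySem.List.index? V w).map (fun k => s + (k : Int)) := by
  induction V generalizing s with
  | nil => simp [PySem.List.index?, PySem.Dict.get?, PySem.List.enumerate_nil]
  | cons x xs ih =>
    rw [PySem.List.enumerate_cons]
    simp only [List.map_cons, PySem.Dict.get?_mk_cons]
    by_cases hx : x = w
    · subst hx
      rw [PySem.List.index?_cons_self]
      simp
    · rw [if_neg (by simpa using hx), ih (s + 1), PySem.List.index?_cons_of_ne _ hx]
      cases PySem.List.index? xs w with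
      | none => rfl
      | some k => simp; ring

lemma getD_w2n (ws : List String) (w : String) : (w2nOf ws).getD w 0 = numOf ws w := by
  rw [PySem.Dict.getD_eq_get?_getD, w2nOf, get?_w2n_aux, numOf]
  cases PySem.List.index? (voc ws) w <;> simp

lemma contains_w2n (ws : List String) (w : String) :
    (w2nOf ws).contains w = decide (w ∈ ws) := by
  rw [PySem.Dict.contains_eq_decide_mem_keys]
  have : (w2nOf ws).keys = voc ws := by
    simp only [w2nOf, PySem.Dict.keys, List.map_map]
    exact PySem.List.map_snd_enumerate (voc ws) 0
  rw [this]
  simp [mem_voc]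

lemma w2n_snoc_not_mem {w : String} {ws : List String} (h : ¬ w ∈ ws) :
    (w2nOf ws).insert w ((voc ws).length : Int) = w2nOf (ws ++ [w]) := by
  apply PySem.Dict.ext
  rw [PySem.Dict.items_insert_of_not_contains _ _ (by simp [contains_w2n, h])]
  simp only [w2nOf, voc_snoc, if_neg h, PySem.List.enumerate_append]
  simp [PySem.List.enumerate_cons, PySem.List.enumerate_nil]

lemma n2w_snoc_not_mem {w : String} {ws : List String} (h : ¬ w ∈ ws) :
    (n2wOf ws).insert ((voc ws).length : Int) w = n2wOf (ws ++ [w]) := by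
  apply PySem.Dict.ext
  have hc : (n2wOf ws).contains ((voc ws).length : Int) = false := by
    rw [Bool.eq_false_iff]
    intro hc
    rw [PySem.Dict.contains_eq_decide_mem_keys] at hc
    have hk : (n2wOf ws).keys = (PySem.List.enumerate (voc ws) 0).map (fun p => p.1) := by
      simp [n2wOf, PySem.Dict.keys]
    rw [hk] at hc
    simp only [decide_eq_true_eq, PySem.List.map_fst_enumerate, PySem.List.mem_pyRange_one] at hc
    omega
  rw [PySem.Dict.items_insert_of_not_contains _ _ hc]
  simp only [n2wOf, voc_snoc, if_neg h, PySem.List.enumerate_append]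
  simp [PySem.List.enumerate_cons, PySem.List.enumerate_nil]

lemma voc_snoc_mem {w : String} {ws : List String} (h : w ∈ ws) : voc (ws ++ [w]) = voc ws := by
  rw [voc_snoc, if_pos h]

lemma numOf_snoc_not_mem {w : String} {ws : List String} (h : ¬ w ∈ ws) :
    numOf (ws ++ [w]) w = ((voc ws).length : Int) := by
  unfold numOf
  rw [voc_snoc, if_neg h, PySem.List.index?_append_singleton_self _ _ (fun hm => h (mem_voc.1 hm))]
  simp

lemma inner_loop (lst ws : List String) (row : List Int) :
    lst.foldl
      (fun (s : List Int × PySem.Dict Int String × PySem.Dict String Int × Int) word =>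
        let (row, num2word, word2num, count) := s
        let (num2word, word2num, count) :=
          if word2num.contains word then (num2word, word2num, count)
          else (num2word.insert count word, word2num.insert word count, count + 1)
        (row ++ [word2num.getD word 0], num2word, word2num, count))
      (row, n2wOf ws, w2nOf ws, ((voc ws).length : Int))
    = (row ++ lst.map (fun w => numOf (ws ++ lst) w),
       n2wOf (ws ++ lst), w2nOf (ws ++ lst), ((voc (ws ++ lst)).length : Int)) := by
  induction lst generalizing ws row with
  | nil => simp
  | cons w rest ih =>
    have hassoc : ws ++ [w] ++ rest = ws ++ w :: rest := by simp
    by_cases h : w ∈ ws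
    · have hc : (w2nOf ws).contains w = true := by simp [contains_w2n, h]
      have hv : voc (ws ++ [w]) = voc ws := voc_snoc_mem h
      have hgetD : (w2nOf ws).getD w 0 = numOf (ws ++ w :: rest) w := by
        rw [getD_w2n]; exact (stab _ h).symm
      simp only [List.foldl_cons, hc, if_true, hgetD]
      rw [show n2wOf ws = n2wOf (ws ++ [w]) by simp [n2wOf, hv],
          show w2nOf ws = w2nOf (ws ++ [w]) by simp [w2nOf, hv],
          show ((voc ws).length : Int) = ((voc (ws ++ [w])).length : Int) by rw [hv],
          ih, hassoc]
      simp
    · have hc : (w2nOf ws).contains w = false := by simp [contains_w2n, h]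
      have hgetD : ((w2nOf ws).insert w ((voc ws).length : Int)).getD w 0
          = numOf (ws ++ w :: rest) w := by
        rw [PySem.Dict.getD_insert_self, ← hassoc, stab (ws := ws ++ [w]) rest (by simp),
          numOf_snoc_not_mem h]
      simp only [List.foldl_cons, hc, Bool.false_eq_true, if_false, hgetD]
      rw [n2w_snoc_not_mem h, w2n_snoc_not_mem h,
          show ((voc ws).length : Int) + 1 = ((voc (ws ++ [w])).length : Int) by
            rw [voc_snoc, if_neg h]; simp,
          ih, hassoc]
      simp

lemma outer_loop (ls : List (List String)) (ws : List String) (acc : List (List Int)) :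
    ls.foldl
      (fun (st : List (List Int) × PySem.Dict Int String × PySem.Dict String Int × Int) lst =>
        let inner := lst.foldl
          (fun (s : List Int × PySem.Dict Int String × PySem.Dict String Int × Int) word =>
            let (row, num2word, word2num, count) := s
            let (num2word, word2num, count) :=
              if word2num.contains word then (num2word, word2num, count)
              else (num2word.insert count word, word2num.insert word count, count + 1)
            (row ++ [word2num.getD word 0], num2word, word2num, count))
          ([], st.2.1, st.2.2.1, st.2.2.2)
        (st.1 ++ [inner.1], inner.2.1, inner.2.2.1, inner.2.2.2))
      (acc, n2wOf ws, w2nOf ws, ((voc ws).length : Int))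
    = (acc ++ ls.map (fun lst => lst.map (fun w => numOf (ws ++ ls.flatten) w)),
       n2wOf (ws ++ ls.flatten), w2nOf (ws ++ ls.flatten),
       ((voc (ws ++ ls.flatten)).length : Int)) := by
  induction ls generalizing ws acc with
  | nil => simp
  | cons lst rest ih =>
    rw [List.foldl_cons]
    dsimp only
    rw [inner_loop lst ws [], ih (ws ++ lst)]
    have hrow : lst.map (fun w => numOf (ws ++ lst) w)
        = lst.map (fun w => numOf (ws ++ (lst :: rest).flatten) w) := by
      apply List.map_congr_left
      intro w hw
      rw [List.flatten_cons, ← List.append_assoc,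
        stab (ws := ws ++ lst) rest.flatten (by simp [hw])]
    simp only [List.nil_append, List.append_assoc, List.flatten_cons, List.map_cons, hrow]
    simp

lemma ofList_w2n (F : List String) :
    PySem.Dict.ofList ((PySem.List.enumerate (voc F)).map (fun p => (p.2, p.1))) = w2nOf F := by
  apply PySem.Dict.ext
  have h1 : ∀ p ∈ (PySem.List.enumerate (voc F)).map (fun p => (p.2, p.1)),
      (PySem.Dict.empty : PySem.Dict String Int).contains ((fun q : String × Int => q.1) p) = false := by
    intro p _; simp [PySem.Dict.contains_empty]
  have h2 : (((PySem.List.enumerate (voc F)).map (fun p => (p.2, p.1))).map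
      (fun q : String × Int => q.1)).Nodup := by
    rw [List.map_map]
    have : ((fun q : String × Int => q.1) ∘ (fun p : Int × String => (p.2, p.1)))
        = (fun p : Int × String => p.2) := rfl
    rw [this, PySem.List.map_snd_enumerate]
    simp [voc, PySem.List.dedup_eq_ofList, PySem.Set.nodup_ofList F]
  have := PySem.Dict.items_foldl_insert_fresh
    ((PySem.List.enumerate (voc F)).map (fun p => (p.2, p.1)))
    (fun q : String × Int => q.1) (fun q : String × Int => q.2) PySem.Dict.empty h1 h2
  simpa [w2nOf, PySem.Dict.items] using this

lemma ofList_n2w (F : List String) :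
    PySem.Dict.ofList (PySem.List.enumerate (voc F)) = n2wOf F := by
  apply PySem.Dict.ext
  have h1 : ∀ p ∈ PySem.List.enumerate (voc F),
      (PySem.Dict.empty : PySem.Dict Int String).contains ((fun q : Int × String => q.1) p) = false := by
    intro p _; simp [PySem.Dict.contains_empty]
  have h2 : ((PySem.List.enumerate (voc F)).map (fun q : Int × String => q.1)).Nodup := by
    have hp := PySem.List.pairwise_lt_enumerate (voc F) 0
    exact (List.pairwise_map.2 (hp.imp fun h => ne_of_lt h))
  have := PySem.Dict.items_foldl_insert_fresh (PySem.List.enumerate (voc F))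
    (fun q : Int × String => q.1) (fun q : Int × String => q.2) PySem.Dict.empty h1 h2
  simpa [n2wOf, PySem.Dict.items] using this

lemma outer0 (ls : List (List String)) :
    ls.foldl
      (fun (st : List (List Int) × PySem.Dict Int String × PySem.Dict String Int × Int) lst =>
        let inner := lst.foldl
          (fun (s : List Int × PySem.Dict Int String × PySem.Dict String Int × Int) word =>
            let (row, num2word, word2num, count) := s
            let (num2word, word2num, count) :=
              if word2num.contains word then (num2word, word2num, count)
              else (num2word.insert count word, word2num.insert word count, count + 1)
            (row ++ [word2num.getD word 0], num2word, word2num, count))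
          ([], st.2.1, st.2.2.1, st.2.2.2)
        (st.1 ++ [inner.1], inner.2.1, inner.2.2.1, inner.2.2.2))
      ([], PySem.Dict.empty, PySem.Dict.empty, 0)
    = (ls.map (fun lst => lst.map (fun w => numOf ls.flatten w)),
       n2wOf ls.flatten, w2nOf ls.flatten, ((voc ls.flatten).length : Int)) :=
  outer_loop ls [] []

theorem m2n_eq_alt (ls : List (List String)) : m2n ls = m2n_alt ls := by
  have hF : ls.flatMap (fun lst => lst) = ls.flatten := by simp
  have hA : m2n ls
      = (ls.map (fun lst => lst.map (fun w => numOf ls.flatten w)),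
         (n2wOf ls.flatten).items, (w2nOf ls.flatten).items) :=
    congrArg (fun st : List (List Int) × PySem.Dict Int String × PySem.Dict String Int × Int =>
      (st.1, st.2.1.items, st.2.2.1.items)) (outer0 ls)
  have hB : m2n_alt ls
      = (ls.map (fun lst => lst.map (fun w =>
          (PySem.Dict.ofList ((PySem.List.enumerate (PySem.List.dedup (ls.flatMap (fun lst => lst)))).map (fun p => (p.2, p.1)))).getD w 0)),
         (PySem.Dict.ofList (PySem.List.enumerate (PySem.List.dedup (ls.flatMap (fun lst => lst))))).items,
         (PySem.Dict.ofList ((PySem.List.enumerate (PySem.List.dedup (ls.flatMap (fun lst => lst)))).map (fun p => (p.2, p.1)))).items) := rfl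
  rw [hA, hB, hF, show PySem.List.dedup ls.flatten = voc ls.flatten from rfl,
      ofList_w2n ls.flatten, ofList_n2w ls.flatten]
  simp [getD_w2n]


-- ===== VERDICT (by name: the statement is the Claim_ definition above) =====
theorem m2n_spec : Claim_equal_m2n := by
  intro input_lists _
  unfold Spec_m2n
  exact m2n_eq_alt input_lists
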